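-- pv_equiv track=rewrite | github.com/dougman82/team-building | HackerRank/Skyscrapers/svange/SkyScraper.py | solve_stack
-- ===== SOURCE A (Python) =====
-- from collections import defaultdict
--
-- def solve_stack(arr):
--     if len(arr) <= 1:
--         return 0
--     stack = []
--
--     num_paths = 0
--
--     for next_building in arr:
--         # Special case where nothing is on the stack
--         if len(stack) == 0:
--             stack.append(next_building)
--             continue
--
--         # If the next building is taller than the last building, pop things off the stack until the building
--         # at the top of the stack is taller than the next building
--         # While doing this, use a hash table to count how many occurences of any building height seen
--         # for a building k seen n times, add n * (n - 1) to the total number of paths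
--         if next_building > stack[-1]:
--             # Default dictionary where each value is initialized to 0
--             seen = defaultdict(lambda: 0)
--             while next_building > stack[-1]:
--                 seen[stack.pop()] += 1
--                 if len(stack) == 0:
--                     break
--             for building in seen.keys():
--                 if seen[building] > 1:
--                     num_paths += seen[building] * (seen[building] - 1)
--             stack.append(next_building)
--         # If the next building is smaller than or equal in height to the next building, push it onto the stack.
--         else:
--             stack.append(next_building)
--
--     # Clean up any remaining stack
--     if stack:
--         seen = defaultdict(lambda: 0)
--         while stack:
--             seen[stack.pop()] += 1
--         for building in seen.keys():
--             if seen[building] > 1: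
--                 num_paths += seen[building] * (seen[building] - 1)
--     return num_paths
-- ===== SOURCE B (Python) =====
-- def solve_stack(arr):
--     # For each building, walk right over the not-taller buildings; every
--     # equal-height building reached before a strictly taller one forms an
--     # (ordered) pair, counted as 2.
--     n = len(arr)
--     total = 0
--     for i in range(n):
--         h = arr[i]
--         for j in range(i + 1, n):
--             x = arr[j]
--             if x > h:
--                 break
--             if x == h:
--                 total += 2
--     return total
-- ===== Notes on version B (the rewrite author's own statement) =====
-- stated objective: simpler
-- what changed: Replaces the monotonic stack with per-pop-event defaultdict tallies by a direct pair count: for each building scan rightwards until a strictly taller building, adding 2 for every equal-height building seen; no stack, no dict, no drain phase.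
import Mathlib
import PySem

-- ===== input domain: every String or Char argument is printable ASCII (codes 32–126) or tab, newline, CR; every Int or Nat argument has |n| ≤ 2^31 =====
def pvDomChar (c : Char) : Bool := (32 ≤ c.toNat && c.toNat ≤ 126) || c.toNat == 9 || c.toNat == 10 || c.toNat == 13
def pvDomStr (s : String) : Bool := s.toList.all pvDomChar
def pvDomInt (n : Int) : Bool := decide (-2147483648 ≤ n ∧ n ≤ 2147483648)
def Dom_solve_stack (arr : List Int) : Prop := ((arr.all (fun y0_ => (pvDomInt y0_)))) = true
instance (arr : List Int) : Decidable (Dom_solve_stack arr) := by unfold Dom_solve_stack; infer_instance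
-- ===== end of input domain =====

-- B replaces A's monotonic stack with per-pop-event defaultdict tallies by a direct pair
-- count (for each building, scan right until a strictly taller one, +2 per equal height):
-- simpler; not faster (quadratic in the worst case where A is linear).

-- ===== PORT A =====
-- A's stack is represented with its TOP at the list head (python append/pop at the end).
-- the inner 'while next_building > stack[-1]: seen[stack.pop()] += 1; if not stack: break'
def pvPopA (x : Int) : List Int → PySem.Dict Int Int → List Int × PySem.Dict Int Int
  | [], seen => ([], seen)
  | t :: rest, seen =>
    if x > t then pvPopA x rest (seen.insert t (seen.getD t 0 + 1))
    else (t :: rest, seen)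

-- 'for building in seen.keys(): if seen[building] > 1: num_paths += seen[building] * (seen[building] - 1)'
def pvPayoffA (seen : PySem.Dict Int Int) : Int :=
  seen.keys.foldl (fun np b => if seen.getD b 0 > 1 then np + seen.getD b 0 * (seen.getD b 0 - 1) else np) 0

-- one iteration of A's 'for next_building in arr' loop; state = (stack, num_paths)
def pvStepA (st : List Int × Int) (x : Int) : List Int × Int :=
  match st.1 with
  | [] => (x :: st.1, st.2)
  | t :: _ =>
    if x > t then
      let r := pvPopA x st.1 PySem.Dict.empty
      (x :: r.1, st.2 + pvPayoffA r.2)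
    else (x :: st.1, st.2)

-- final 'while stack: seen[stack.pop()] += 1'
def pvDrainA (stack : List Int) : PySem.Dict Int Int :=
  stack.foldl (fun seen t => seen.insert t (seen.getD t 0 + 1)) PySem.Dict.empty

def solve_stack (arr : List Int) : Int :=
  if arr.length ≤ 1 then 0
  else
    let st := arr.foldl pvStepA ([], 0)
    if st.1.isEmpty then st.2 else st.2 + pvPayoffA (pvDrainA st.1)

-- ===== PORT B =====
-- inner loop 'for x in arr[i+1:]: if x > h: break; if x == h: total += 2'
def pvScan (h : Int) : List Int → Int
  | [] => 0
  | x :: rest => if x > h then 0 else (if x = h then 2 else 0) + pvScan h rest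

-- outer loop 'for i, h in enumerate(arr)': each tail arr[i+1:] is the suffix after h
def pvOuter : List Int → Int
  | [] => 0
  | h :: rest => pvScan h rest + pvOuter rest

def solve_stack_alt (arr : List Int) : Int := pvOuter arr

-- ===== PRECONDITION & SPEC =====
def Spec_solve_stack (arr : List Int) (out : Int) : Prop := out = solve_stack_alt arr
instance (arr : List Int) (out : Int) : Decidable (Spec_solve_stack arr out) := by unfold Spec_solve_stack; infer_instance

-- ===== CLAIM (what is proved, stated in full; the proofs are below) =====
def Claim_equal_solve_stack : Prop := ∀ (arr : List Int), Dom_solve_stack arr → Spec_solve_stack arr (solve_stack arr)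

-- ===== LEMMAS AND PROOFS =====

-- the pending-pairs measure: for each position, (multiplicity of its height) - 1;
-- summed this is Σ_h c_h * (c_h - 1)
def pvGc (l : List Int) : Int := (l.map (fun h => (l.count h : Int) - 1)).sum

-- what A's dict-tally-then-scan computes on a popped list
def pvGd (l : List Int) : Int :=
  pvPayoffA (l.foldl (fun d h => d.insert h (d.getD h 0 + 1)) PySem.Dict.empty)

-- A's stack after processing a prefix
def pvStack (p : List Int) : List Int :=
  p.foldl (fun s x => x :: s.dropWhile (fun t => decide (t < x))) []

-- number of valid left partners of a new element y appended after p
def pvCountL : List Int → Int → Nat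
  | [], _ => 0
  | a :: q, y => pvCountL q y + (if a = y ∧ q.all (fun z => decide (z ≤ y)) then 1 else 0)

theorem pvPopA_spec (x : Int) : ∀ (l : List Int) (seen : PySem.Dict Int Int),
    pvPopA x l seen = (l.dropWhile (fun t => decide (t < x)),
      (l.takeWhile (fun t => decide (t < x))).foldl (fun d h => d.insert h (d.getD h 0 + 1)) seen) := by
  intro l
  induction l with
  | nil => intro seen; simp [pvPopA]
  | cons t rest ih =>
    intro seen
    by_cases h : t < x
    · simp [pvPopA, h, ih]
    · simp [pvPopA, h]

theorem pvGd_eq_pvGc (l : List Int) : pvGd l = pvGc l := by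
  unfold pvGd pvPayoffA
  rw [PySem.Dict.keys_foldl_insert (f := fun d x => d.getD x 0 + 1), PySem.Dict.keys_empty,
    PySem.Set.update_nil_left]
  have hgetD : ∀ b : Int,
      (l.foldl (fun d h => d.insert h (d.getD h 0 + 1)) PySem.Dict.empty).getD b 0 = (l.count b : Int) := by
    intro b
    rw [PySem.Dict.getD_foldl_insert_add_one, PySem.Dict.getD_empty]
    ring
  refine Eq.trans (PySem.List.foldl_congr_mem (PySem.Set.ofList l) _
    (fun np b => np + (l.count b : Int) * ((l.count b : Int) - 1)) 0 ?_) ?_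
  · intro acc b hb
    have hmem : b ∈ l := (PySem.Set.mem_ofList l b).1 hb
    have hc1 : 1 ≤ l.count b := List.count_pos_iff.2 hmem
    dsimp only
    rw [hgetD b]
    by_cases h1 : (l.count b : Int) > 1
    · rw [if_pos h1]
    · have h2 : l.count b = 1 := by omega
      simp [h2]
  rw [PySem.List.foldl_add, zero_add]
  -- both sides are ∑ over l.toFinset of count·(count−1)
  have hnodup := PySem.Set.nodup_ofList (xs := l)
  have htf : (PySem.Set.ofList l).toFinset = l.toFinset := by
    ext b
    simp [PySem.Set.mem_ofList]
  rw [← List.sum_toFinset _ hnodup, htf]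
  unfold pvGc
  rw [Finset.sum_list_map_count]
  refine Finset.sum_congr rfl ?_
  intro b _
  rw [nsmul_eq_mul]

theorem pvGc_nil : pvGc [] = 0 := by simp [pvGc]

theorem pvSum_indicator (x : Int) : ∀ (l : List Int),
    (l.map (fun h => if x = h then (1 : Int) else 0)).sum = l.count x := by
  intro l
  induction l with
  | nil => simp
  | cons a q ih =>
    by_cases h : x = a
    · subst h
      simp [ih]
      ring
    · have h' : ¬ a = x := fun he => h he.symm
      simp [h, h', ih]

theorem pvGc_cons (x : Int) (l : List Int) : pvGc (x :: l) = pvGc l + 2 * (l.count x : Int) := by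
  unfold pvGc
  have hmap : l.map (fun h => ((x :: l).count h : Int) - 1)
      = l.map (fun h => ((l.count h : Int) - 1) + (if x = h then (1 : Int) else 0)) := by
    refine List.map_congr_left ?_
    intro h _
    rw [List.count_cons]
    by_cases he : x = h
    · simp [he]
    · have he' : ¬ (x == h) = true := by simpa using he
      simp [he, he']
  rw [List.map_cons, List.sum_cons, hmap]
  have hsplit : (l.map (fun h => ((l.count h : Int) - 1) + (if x = h then (1 : Int) else 0))).sum
      = (l.map (fun h => (l.count h : Int) - 1)).sum
        + (l.map (fun h => if x = h then (1 : Int) else 0)).sum := by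
    induction l with
    | nil => simp
    | cons a q ih => simp; ring
  rw [hsplit, pvSum_indicator, List.count_cons]
  simp
  ring

theorem pvGc_append_disjoint (l1 l2 : List Int) (hd : ∀ a ∈ l1, a ∉ l2) :
    pvGc (l1 ++ l2) = pvGc l1 + pvGc l2 := by
  unfold pvGc
  rw [List.map_append, List.sum_append]
  have h1 : l1.map (fun h => ((l1 ++ l2).count h : Int) - 1)
      = l1.map (fun h => (l1.count h : Int) - 1) := by
    refine List.map_congr_left ?_
    intro h hmem
    rw [List.count_append, List.count_eq_zero.2 (hd h hmem)]
    simp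
  have h2 : l2.map (fun h => ((l1 ++ l2).count h : Int) - 1)
      = l2.map (fun h => (l2.count h : Int) - 1) := by
    refine List.map_congr_left ?_
    intro h hmem
    have : h ∉ l1 := fun hc => hd h hc hmem
    rw [List.count_append, List.count_eq_zero.2 this]
    simp
  rw [h1, h2]

theorem pvSorted_dropWhile_ge (b : Int) : ∀ (s : List Int), List.Pairwise (fun a c => a ≤ c) s →
    ∀ y ∈ s.dropWhile (fun t => decide (t < b)), b ≤ y := by
  intro s
  induction s with
  | nil => intro _ y hy; simp at hy
  | cons a r ih =>
    intro hs y hy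
    rw [List.dropWhile_cons] at hy
    by_cases ha : a < b
    · rw [if_pos (by simpa using ha)] at hy
      exact ih (List.pairwise_cons.1 hs).2 y hy
    · rw [if_neg (by simpa using ha)] at hy
      rcases List.mem_cons.1 hy with he | hm
      · omega
      · have := (List.pairwise_cons.1 hs).1 y hm
        omega

theorem pvSorted_dropWhile (b : Int) (s : List Int) (hs : List.Pairwise (fun a c => a ≤ c) s) :
    List.Pairwise (fun a c => a ≤ c) (s.dropWhile (fun t => decide (t < b))) :=
  hs.sublist (List.dropWhile_sublist _)

theorem pvSorted_step (b : Int) (s : List Int) (hs : List.Pairwise (fun a c => a ≤ c) s) :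
    List.Pairwise (fun a c => a ≤ c) (b :: s.dropWhile (fun t => decide (t < b))) :=
  List.pairwise_cons.2 ⟨fun y hy => pvSorted_dropWhile_ge b s hs y hy, pvSorted_dropWhile b s hs⟩

theorem pvStack_sorted_aux : ∀ (p : List Int) (s : List Int),
    List.Pairwise (fun a c => a ≤ c) s →
    List.Pairwise (fun a c => a ≤ c)
      (p.foldl (fun s x => x :: s.dropWhile (fun t => decide (t < x))) s) := by
  intro p
  induction p with
  | nil => intro s hs; exact hs
  | cons a q ih => intro s hs; exact ih _ (pvSorted_step a s hs)

theorem pvStack_sorted (p : List Int) : List.Pairwise (fun a c => a ≤ c) (pvStack p) :=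
  pvStack_sorted_aux p [] List.Pairwise.nil

theorem pvCount_dropWhile_lt (b y : Int) (s : List Int)
    (hs : List.Pairwise (fun a c => a ≤ c) s) (hy : y < b) :
    (s.dropWhile (fun t => decide (t < b))).count y = 0 := by
  rw [List.count_eq_zero]
  intro hmem
  have := pvSorted_dropWhile_ge b s hs y hmem
  omega

theorem pvCount_dropWhile_ge (b y : Int) (s : List Int) (hy : b ≤ y) :
    (s.dropWhile (fun t => decide (t < b))).count y = s.count y := by
  conv_rhs => rw [← List.takeWhile_append_dropWhile (p := fun t => decide (t < b)) (l := s)]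
  rw [List.count_append]
  have : (s.takeWhile (fun t => decide (t < b))).count y = 0 := by
    rw [List.count_eq_zero]
    intro hmem
    have := List.mem_takeWhile_imp hmem
    simp at this
    omega
  omega

theorem pvStack_append (p : List Int) (b : Int) :
    pvStack (p ++ [b]) = b :: (pvStack p).dropWhile (fun t => decide (t < b)) := by
  unfold pvStack
  rw [List.foldl_append]
  rfl

theorem pvCountL_append (p : List Int) (b y : Int) :
    pvCountL (p ++ [b]) y
      = if y < b then 0 else (if b = y then 1 else 0) + pvCountL p y := by
  induction p with
  | nil =>
    show pvCountL [b] y = _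
    show pvCountL [] y + (if b = y ∧ ([] : List Int).all (fun z => decide (z ≤ y)) then 1 else 0) = _
    by_cases he : b = y
    · subst he
      simp [pvCountL]
    · by_cases hy : y < b <;> simp [pvCountL, he, hy]
  | cons a q ih =>
    show pvCountL (q ++ [b]) y + (if a = y ∧ (q ++ [b]).all (fun z => decide (z ≤ y)) then 1 else 0)
        = if y < b then 0
          else (if b = y then 1 else 0)
            + (pvCountL q y + (if a = y ∧ q.all (fun z => decide (z ≤ y)) then 1 else 0))
    rw [ih]
    by_cases hy : y < b
    · have hb : ¬ b ≤ y := by omega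
      simp [hy, List.all_append, hb]
    · have hb : b ≤ y := by omega
      have hall : ((q ++ [b]).all (fun z => decide (z ≤ y))) = q.all (fun z => decide (z ≤ y)) := by
        simp [List.all_append, hb]
      rw [hall, if_neg hy, if_neg hy]
      omega

theorem pvCount_pvStack : ∀ (p : List Int) (y : Int), (pvStack p).count y = pvCountL p y := by
  intro p
  induction p using List.reverseRecOn with
  | nil => intro y; simp [pvStack, pvCountL]
  | append_singleton p b ih =>
    intro y
    rw [pvStack_append, pvCountL_append, List.count_cons]
    by_cases hy : y < b
    · have hne : ¬ (b == y) = true := by simp; omega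
      rw [pvCount_dropWhile_lt b y (pvStack p) (pvStack_sorted p) hy]
      simp [hne, hy]
    · have hb : b ≤ y := by omega
      rw [pvCount_dropWhile_ge b y (pvStack p) hb, ih y]
      by_cases he : b = y
      · simp [he]
        omega
      · have hne : ¬ (b == y) = true := by simpa using he
        simp [hne, he, hy]

theorem pvScan_append (h y : Int) : ∀ (q : List Int),
    pvScan h (q ++ [y]) = pvScan h q
      + (if q.all (fun z => decide (z ≤ h)) then (if y > h then 0 else if y = h then 2 else 0) else 0) := by
  intro q
  induction q with
  | nil => simp [pvScan]
  | cons x q' ih =>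
    by_cases hx : x > h
    · have hxe : ¬ x ≤ h := by omega
      simp [pvScan, hx, hxe]
    · have hxe : x ≤ h := by omega
      show (if x > h then 0 else (if x = h then 2 else 0) + pvScan h (q' ++ [y])) = _
      rw [if_neg hx, ih]
      simp [pvScan, hx, hxe]
      ring

theorem pvOuter_append (y : Int) : ∀ (p : List Int),
    pvOuter (p ++ [y]) = pvOuter p + 2 * (pvCountL p y : Int) := by
  intro p
  induction p with
  | nil => simp [pvOuter, pvScan, pvCountL]
  | cons a q ih =>
    show pvScan a (q ++ [y]) + pvOuter (q ++ [y]) = pvScan a q + pvOuter q + _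
    rw [pvScan_append, ih]
    show _ = _ + 2 * ((pvCountL q y + if a = y ∧ q.all (fun z => decide (z ≤ y)) then 1 else 0 : Nat) : Int)
    by_cases he : a = y
    · subst he
      by_cases hall : q.all (fun z => decide (z ≤ a)) = true
      · simp [hall]
        ring
      · simp [hall]
        ring
    · have h1 : (if y > a then (0:Int) else if y = a then 2 else 0) = 0 := by
        by_cases hy : y > a
        · simp [hy]
        · have : ¬ y = a := fun hc => he hc.symm
          simp [hy, this]
      simp [he, h1]
      ring

theorem pvPayoff_empty : pvPayoffA PySem.Dict.empty = 0 := by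
  unfold pvPayoffA
  rw [PySem.Dict.keys_empty]
  rfl

theorem pvStepA_char (s : List Int) (t x : Int) (hs : List.Pairwise (fun a c => a ≤ c) s) :
    pvStepA (s, t) x = (x :: s.dropWhile (fun t' => decide (t' < x)),
      t + pvGd (s.takeWhile (fun t' => decide (t' < x)))) := by
  cases s with
  | nil =>
    show ((x :: [], t) : List Int × Int) = _
    simp [pvGd, pvPayoff_empty]
  | cons top r =>
    by_cases hx : x > top
    · show (if x > top then _ else _) = _
      rw [if_pos hx, pvPopA_spec]
      rfl
    · show (if x > top then _ else _) = _
      rw [if_neg hx]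
      have h1 : ((top :: r).dropWhile (fun t' => decide (t' < x))) = top :: r := by
        rw [List.dropWhile_cons, if_neg (by simp; omega)]
      have h2 : ((top :: r).takeWhile (fun t' => decide (t' < x))) = [] := by
        rw [List.takeWhile_cons, if_neg (by simp; omega)]
      rw [h1, h2]
      simp [pvGd, pvPayoff_empty]

theorem pvMain_fold : ∀ (p : List Int),
    p.foldl pvStepA ([], 0) = (pvStack p, pvOuter p - pvGc (pvStack p)) := by
  intro p
  induction p using List.reverseRecOn with
  | nil => simp [pvStack, pvOuter, pvGc_nil]
  | append_singleton p b ih =>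
    rw [List.foldl_append, ih]
    show pvStepA (pvStack p, pvOuter p - pvGc (pvStack p)) b = _
    rw [pvStepA_char _ _ _ (pvStack_sorted p), pvStack_append, pvOuter_append]
    have hsplit : pvGc (pvStack p) = pvGc ((pvStack p).takeWhile (fun t' => decide (t' < b)))
        + pvGc ((pvStack p).dropWhile (fun t' => decide (t' < b))) := by
      conv_lhs => rw [← List.takeWhile_append_dropWhile (p := fun t' => decide (t' < b)) (l := pvStack p)]
      refine pvGc_append_disjoint _ _ ?_
      intro a ha hc
      have h1 := List.mem_takeWhile_imp ha
      have h2 := pvSorted_dropWhile_ge b (pvStack p) (pvStack_sorted p) a hc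
      simp at h1
      omega
    have hcons : pvGc (b :: (pvStack p).dropWhile (fun t' => decide (t' < b)))
        = pvGc ((pvStack p).dropWhile (fun t' => decide (t' < b)))
          + 2 * ((((pvStack p).dropWhile (fun t' => decide (t' < b))).count b : Int)) := by
      rw [pvGc_cons]
    have hcnt : (((pvStack p).dropWhile (fun t' => decide (t' < b))).count b : Int)
        = (pvCountL p b : Int) := by
      rw [pvCount_dropWhile_ge b b (pvStack p) le_rfl, pvCount_pvStack]
    rw [pvGd_eq_pvGc]
    refine Prod.ext rfl ?_
    show pvOuter p - pvGc (pvStack p) + pvGc ((pvStack p).takeWhile (fun t' => decide (t' < b))) = _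
    rw [hsplit, hcons, hcnt]
    ring

theorem pvFinal : ∀ (arr : List Int), solve_stack arr = solve_stack_alt arr := by
  intro arr
  unfold solve_stack solve_stack_alt
  by_cases hl : arr.length ≤ 1
  · rw [if_pos hl]
    match arr with
    | [] => simp [pvOuter]
    | [a] => simp [pvOuter, pvScan]
    | a :: b :: r => simp at hl
  · rw [if_neg hl]
    show (if (arr.foldl pvStepA ([], 0)).1.isEmpty then (arr.foldl pvStepA ([], 0)).2
      else (arr.foldl pvStepA ([], 0)).2 + pvPayoffA (pvDrainA (arr.foldl pvStepA ([], 0)).1)) = _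
    rw [pvMain_fold]
    by_cases he : (pvStack arr).isEmpty
    · have hnil : pvStack arr = [] := by
        cases h : pvStack arr with
        | nil => rfl
        | cons a l => rw [h] at he; simp at he
      simp [hnil, pvGc_nil]
    · have hdrain : pvPayoffA (pvDrainA (pvStack arr)) = pvGc (pvStack arr) := by
        unfold pvDrainA
        exact pvGd_eq_pvGc (pvStack arr)
      simp only [he]
      show pvOuter arr - pvGc (pvStack arr) + pvPayoffA (pvDrainA (pvStack arr)) = pvOuter arr
      rw [hdrain]
      ring

-- ===== VERDICT (by name: the statement is the Claim_ definition above) =====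
theorem solve_stack_spec : Claim_equal_solve_stack := by
  intro arr _
  unfold Spec_solve_stack
  exact pvFinal arr
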